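-- pv_equiv track=rewrite | github.com/ahmsloahng/GPT | ngram_lms.py | build_ngrams_ctrl
-- ===== SOURCE A (Python) =====
-- def build_ngrams_ctrl(tokens:list, n:int) -> list:
--     tokens = ['<BOS>']*(n-1) + tokens + ['<EOS>']*(n-1)
--     all_ngram = []
--     for word_index in range(len(tokens) - n + 1):
--         ngram = ()
--         for number in range(n):
--             ngram += (tokens[word_index + number],)
--         all_ngram.append(ngram)
--     return all_ngram
-- ===== SOURCE B (Python) =====
-- def build_ngrams_ctrl(tokens: list, n: int) -> list:
--     tokens = ['<BOS>'] * (n - 1) + tokens + ['<EOS>'] * (n - 1)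
--     all_ngram = []
--     window = ()
--     for token in tokens:
--         window = (window + (token,))[-n:]
--         if len(window) == n:
--             all_ngram.append(window)
--     return all_ngram
-- ===== Notes on version B (the rewrite author's own statement) =====
-- stated objective: alternative
-- what changed: Replaces the nested offset-indexing loops (for each start index, an inner range(n) loop building each tuple by repeated concatenation) with a single pass over the padded tokens that maintains a rolling window of the last n tokens and emits it whenever it is full; no indexing and no per-element tuple rebuilds.
-- outside the precondition, e.g. on build_ngrams_ctrl([], 0): A returns [()], B returns []; on build_ngrams_ctrl(['a'], -1): A returns [(), (), ()], B returns []
import Mathlib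
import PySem

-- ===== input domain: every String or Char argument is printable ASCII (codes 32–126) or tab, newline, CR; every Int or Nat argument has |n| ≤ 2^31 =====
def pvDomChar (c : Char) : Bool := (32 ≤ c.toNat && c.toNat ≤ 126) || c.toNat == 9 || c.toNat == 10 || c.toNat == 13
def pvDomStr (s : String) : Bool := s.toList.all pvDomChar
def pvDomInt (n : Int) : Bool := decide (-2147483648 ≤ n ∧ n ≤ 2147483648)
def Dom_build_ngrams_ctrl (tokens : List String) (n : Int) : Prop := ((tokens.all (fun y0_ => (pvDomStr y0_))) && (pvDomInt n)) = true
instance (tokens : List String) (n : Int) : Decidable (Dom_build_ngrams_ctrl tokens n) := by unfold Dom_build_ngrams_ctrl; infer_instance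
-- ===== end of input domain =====

-- B replaces A's nested offset-indexing loops by a single pass with a rolling window of the
-- last n tokens (alternative decomposition, same cost); Pre_ excludes the unspecified corner
-- n ≤ 0 (A: empty tuples from its range arithmetic, B: []).


-- ===== PORT A =====
-- literal transliteration of A: pad, then for each start index build the tuple by an inner
-- indexing loop.  tokens[word_index + number] is ported with pyGetD (default ""): every
-- executed access has 0 ≤ word_index + number < len(toks), so the default is never used.
def build_ngrams_ctrl (tokens : List String) (n : Int) : List (List String) :=
  let toks := PySem.List.pyRepeat ["<BOS>"] (n - 1) ++ tokens ++ PySem.List.pyRepeat ["<EOS>"] (n - 1)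
  (PySem.List.pyRange 0 (PySem.List.len toks - n + 1) 1).foldl
    (fun all_ngram word_index =>
      all_ngram ++
        [(PySem.List.pyRange 0 n 1).foldl
          (fun ngram number => ngram ++ [PySem.List.pyGetD toks (word_index + number) ""]) []])
    []

-- ===== PORT B =====
-- literal transliteration of B: pad, then one pass keeping window = (window + (token,))[-n:]
-- and emitting the window whenever len(window) == n.
def build_ngrams_ctrl_alt (tokens : List String) (n : Int) : List (List String) :=
  let toks := PySem.List.pyRepeat ["<BOS>"] (n - 1) ++ tokens ++ PySem.List.pyRepeat ["<EOS>"] (n - 1)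
  (toks.foldl
    (fun (st : List (List String) × List String) token =>
      let window := PySem.List.slice (st.2 ++ [token]) (some (-n)) none
      (if PySem.List.len window = n then st.1 ++ [window] else st.1, window))
    ([], [])).1

-- ===== PRECONDITION & SPEC =====
-- Pre_ excludes non-positive n, a corner where "the list of n-grams" is unspecified and the two
-- values are accidental: A returns len(tokens)-n+1 empty tuples (an artefact of its range
-- arithmetic) while B returns [].
def Pre_build_ngrams_ctrl (tokens : List String) (n : Int) : Prop := 1 ≤ n
instance (tokens : List String) (n : Int) : Decidable (Pre_build_ngrams_ctrl tokens n) := by unfold Pre_build_ngrams_ctrl; infer_instance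

def pvWitness_build_ngrams_ctrl : List String × Int := (["a", "b", "c"], 2)

def Spec_build_ngrams_ctrl (tokens : List String) (n : Int) (out : List (List String)) : Prop :=
  out = build_ngrams_ctrl_alt tokens n
instance (tokens : List String) (n : Int) (out : List (List String)) : Decidable (Spec_build_ngrams_ctrl tokens n out) := by unfold Spec_build_ngrams_ctrl; infer_instance

-- ===== CLAIM (what is proved, stated in full; the proofs are below) =====
def Claim_equal_build_ngrams_ctrl : Prop := ∀ (tokens : List String) (n : Int), Dom_build_ngrams_ctrl tokens n → Pre_build_ngrams_ctrl tokens n → Spec_build_ngrams_ctrl tokens n (build_ngrams_ctrl tokens n)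

-- ===== LEMMAS AND PROOFS =====

-- the list of all length-m windows of p, and the current (last-min(m,|p|)) window
lemma pv_window_eq (toks : List String) (k m : Nat) (h : k + m ≤ toks.length) :
    (List.range m).map (fun j => toks.getD (k + j) "") = (toks.drop k).take m := by
  apply List.ext_getElem
  · simp; omega
  · intro i h1 h2
    simp only [List.getElem_map, List.getElem_range, List.getElem_take, List.getElem_drop]
    rw [List.getD_eq_getElem]

def pvWins (m : Nat) (p : List String) : List (List String) :=
  (List.range (p.length + 1 - m)).map (fun i => (p.drop i).take m)
def pvWin (m : Nat) (p : List String) : List String := p.drop (p.length - m)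

lemma pvA_eq (toks : List String) (m : Nat) :
    (PySem.List.pyRange 0 (PySem.List.len toks - (m : Int) + 1) 1).foldl
      (fun all_ngram word_index =>
        all_ngram ++
          [(PySem.List.pyRange 0 (m : Int) 1).foldl
            (fun ngram number => ngram ++ [PySem.List.pyGetD toks (word_index + number) ""]) []])
      [] = pvWins m toks := by
  rw [PySem.List.foldl_append_singleton_eq_map]
  rw [PySem.List.pyRange_one 0 (PySem.List.len toks - (m : Int) + 1)]
  simp only [PySem.List.len_eq, Int.sub_zero, List.map_map, List.nil_append]
  have hcut : ((toks.length : Int) - (m : Int) + 1).toNat = toks.length + 1 - m := by omega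
  rw [hcut]
  unfold pvWins
  apply List.map_congr_left
  intro k hk
  simp only [List.mem_range] at hk
  simp only [Function.comp_apply, zero_add]
  rw [PySem.List.foldl_append_singleton_eq_map, PySem.List.pyRange_one]
  simp only [Int.sub_zero, List.map_map, List.nil_append, Int.toNat_natCast]
  rw [← pv_window_eq toks k m (by omega)]
  apply List.map_congr_left
  intro j hj
  simp only [Function.comp_apply, zero_add]
  have hc : ((k : Int) + (j : Int)) = ((k + j : Nat) : Int) := by push_cast; ring
  rw [hc, PySem.List.pyGetD_natCast]

lemma pv_wins_snoc (m : Nat) (hm : 1 ≤ m) (p : List String) (t : String) :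
    pvWins m (p ++ [t]) =
      if m ≤ p.length + 1 then pvWins m p ++ [pvWin m (p ++ [t])] else pvWins m p := by
  unfold pvWins pvWin
  by_cases h : m ≤ p.length + 1
  · simp only [h, if_true, List.length_append, List.length_singleton]
    have h1 : p.length + 1 + 1 - m = (p.length + 1 - m) + 1 := by omega
    rw [h1, List.range_succ, List.map_append]
    congr 1
    · apply List.map_congr_left
      intro i hi
      simp only [List.mem_range] at hi
      rw [List.drop_append_of_le_length (by omega), List.take_append_of_le_length (by simp; omega)]
    · simp only [List.map_cons, List.map_nil]
      congr 1
      apply List.take_of_length_le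
      simp; omega
  · simp only [h, if_false]
    have h0 : p.length + 1 + 1 - m = 0 := by omega
    have h0' : p.length + 1 - m = 0 := by omega
    simp [h0, h0']

lemma pv_win_snoc (m : Nat) (hm : 1 ≤ m) (p : List String) (t : String) :
    (pvWin m p ++ [t]).drop ((pvWin m p).length + 1 - m) = pvWin m (p ++ [t]) := by
  unfold pvWin
  rw [List.drop_append_of_le_length (by simp; omega), List.drop_drop]
  have hq : (p ++ [t]).length = p.length + 1 := by simp
  rw [hq, List.drop_append_of_le_length (by omega)]
  simp only [List.length_drop]
  have hix : p.length - m + (p.length - (p.length - m) + 1 - m) = p.length + 1 - m := by omega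
  rw [hix]

lemma pvB_roll (m : Nat) (hm : 1 ≤ m) (s : List String) :
    ∀ p : List String,
      (s.foldl
        (fun (st : List (List String) × List String) token =>
          let window := PySem.List.slice (st.2 ++ [token]) (some (-(m : Int))) none
          (if PySem.List.len window = (m : Int) then st.1 ++ [window] else st.1, window))
        (pvWins m p, pvWin m p))
      = (pvWins m (p ++ s), pvWin m (p ++ s)) := by
  induction s with
  | nil => intro p; simp
  | cons t s ih =>
    intro p
    have hstep : PySem.List.slice (pvWin m p ++ [t]) (some (-(m : Int))) none = pvWin m (p ++ [t]) := by
      rw [PySem.List.slice_from_neg_natCast (pvWin m p ++ [t]) m (by omega)]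
      simp only [List.length_append, List.length_singleton]
      exact pv_win_snoc m hm p t
    have hlen : (PySem.List.len (pvWin m (p ++ [t])) = (m : Int)) ↔ m ≤ p.length + 1 := by
      simp only [PySem.List.len_eq, Nat.cast_inj]
      unfold pvWin
      simp only [List.length_drop, List.length_append, List.length_singleton]
      omega
    simp only [List.foldl_cons, hstep]
    by_cases hc : m ≤ p.length + 1
    · rw [if_pos (hlen.mpr hc)]
      have hw : pvWins m (p ++ [t]) = pvWins m p ++ [pvWin m (p ++ [t])] := by
        rw [pv_wins_snoc m hm p t, if_pos hc]
      rw [← hw, ih (p ++ [t])]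
      simp
    · rw [if_neg (fun hx => hc (hlen.mp hx))]
      have : pvWins m p = pvWins m (p ++ [t]) := by rw [pv_wins_snoc m hm p t, if_neg hc]
      rw [this, ih (p ++ [t])]
      simp

lemma pv_spec (tokens : List String) (n : Int) (hnD : ¬ n ≤ 0) :
    (let toks := PySem.List.pyRepeat ["<BOS>"] (n - 1) ++ tokens ++ PySem.List.pyRepeat ["<EOS>"] (n - 1)
     (PySem.List.pyRange 0 (PySem.List.len toks - n + 1) 1).foldl
      (fun all_ngram word_index =>
        all_ngram ++
          [(PySem.List.pyRange 0 n 1).foldl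
            (fun ngram number => ngram ++ [PySem.List.pyGetD toks (word_index + number) ""]) []])
      [])
    = (let toks := PySem.List.pyRepeat ["<BOS>"] (n - 1) ++ tokens ++ PySem.List.pyRepeat ["<EOS>"] (n - 1)
       (toks.foldl
        (fun (st : List (List String) × List String) token =>
          let window := PySem.List.slice (st.2 ++ [token]) (some (-n)) none
          (if PySem.List.len window = n then st.1 ++ [window] else st.1, window))
        ([], [])).1) := by
  have hn1 : 1 ≤ n := by omega
  obtain ⟨m, rfl⟩ : ∃ m : Nat, n = (m : Int) := ⟨n.toNat, (Int.toNat_of_nonneg (by omega)).symm⟩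
  have hm : 1 ≤ m := by exact_mod_cast hn1
  set toks := PySem.List.pyRepeat ["<BOS>"] ((m : Int) - 1) ++ tokens ++ PySem.List.pyRepeat ["<EOS>"] ((m : Int) - 1) with htoks
  show _ = (toks.foldl _ ([], [])).1
  have h0 : (([] : List (List String)), ([] : List String)) = (pvWins m [], pvWin m []) := by
    unfold pvWins pvWin
    have : 0 + 1 - m = 0 := by omega
    simp [this]
  rw [pvA_eq toks m, h0, pvB_roll m hm toks []]
  simp

-- ===== VERDICT (by name: the statement is the Claim_ definition above) =====
theorem build_ngrams_ctrl_spec : Claim_equal_build_ngrams_ctrl := by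
  intro tokens n _ hpre
  have hn : ¬ n ≤ 0 := by unfold Pre_build_ngrams_ctrl at hpre; omega
  exact (pv_spec tokens n hn : _)
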